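-- pv_equiv track=rewrite | github.com/drmlgentry/hyperbolic-flavor-scan | hyperbolic-flavor-scan/scans/pmns_deep_m003.py | generate_words
-- ===== SOURCE A (Python) =====
-- from itertools import permutations, product as iproduct
--
-- def generate_words(gens, length):
--     letters = list(gens) + [g.upper() for g in gens]
--     for combo in iproduct(letters, repeat=length):
--         valid = True
--         for k in range(len(combo)-1):
--             if combo[k].lower() == combo[k+1].lower() and combo[k] != combo[k+1]:
--                 valid = False
--                 break
--         if valid:
--             yield ''.join(combo)
-- ===== SOURCE B (Python) =====
-- def generate_words(gens, length):
--     # DFS: extend only valid prefixes, trying letters in the same order as A,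
--     # so only valid words (plus their prefixes) are ever visited.
--     letters = list(gens) + [g.upper() for g in gens]
--
--     def extend(word, last, remaining):
--         if remaining == 0:
--             yield word
--             return
--         for l in letters:
--             if last is None or not (last.lower() == l.lower() and last != l):
--                 yield from extend(word + l, l, remaining - 1)
--
--     yield from extend('', None, length)
-- ===== Notes on version B (the rewrite author's own statement) =====
-- stated objective: alternative
-- what changed: Replaces exhaustive enumeration of all letter tuples followed by an index-loop adjacency filter with a recursive DFS that only extends prefixes whose last letter is compatible with the next one, visiting letters in the same order so the yielded sequence is identical.
import Mathlib
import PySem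

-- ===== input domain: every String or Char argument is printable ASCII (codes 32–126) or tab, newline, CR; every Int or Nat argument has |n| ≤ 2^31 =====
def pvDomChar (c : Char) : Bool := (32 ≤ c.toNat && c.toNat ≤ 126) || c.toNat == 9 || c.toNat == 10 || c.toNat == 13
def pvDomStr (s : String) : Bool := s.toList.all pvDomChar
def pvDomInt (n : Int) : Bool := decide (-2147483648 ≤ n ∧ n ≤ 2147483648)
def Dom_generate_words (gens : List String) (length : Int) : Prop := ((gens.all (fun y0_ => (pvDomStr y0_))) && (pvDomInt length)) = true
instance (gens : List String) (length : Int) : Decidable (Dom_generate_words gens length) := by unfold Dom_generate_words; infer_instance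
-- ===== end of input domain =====

-- B replaces A's enumerate-all-tuples-then-filter with a DFS that extends only valid prefixes,
-- trying letters in the same order, so it yields the same words in the same order (alternative algorithm).
-- A and B are Python generators; equivalence is about the list of yielded values.


-- ===== PORT A =====
-- itertools.product(letters, repeat=n), in product's order (leftmost position varies slowest)
def pvProd (letters : List String) : Nat → List (List String)
  | 0 => [[]]
  | n + 1 => letters.flatMap (fun l => (pvProd letters n).map (fun c => l :: c))

-- the inner 'for k in range(len(combo)-1): … break' validity loop ('all' short-circuits like break)
def pvValidA (combo : List String) : Bool :=
  (PySem.List.pyRange 0 ((combo.length : Int) - 1) 1).all (fun k =>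
    !(PySem.Str.lower (PySem.List.pyGetD combo k "") == PySem.Str.lower (PySem.List.pyGetD combo (k + 1) "")
      && PySem.List.pyGetD combo k "" != PySem.List.pyGetD combo (k + 1) ""))

def generate_words (gens : List String) (length : Int) : List String :=
  if length < 0 then []  -- Python raises ValueError here; excluded by Pre_
  else
    let letters := gens ++ gens.map PySem.Str.upper
    (pvProd letters length.toNat).foldl
      (fun acc combo => if pvValidA combo then acc ++ [PySem.Str.join "" combo] else acc) []

-- ===== PORT B =====
def pvOkB (last : Option String) (l : String) : Bool :=
  match last with
  | none => true
  | some a => !(PySem.Str.lower a == PySem.Str.lower l && a != l)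

def pvExtend (letters : List String) (word : String) (last : Option String) : Nat → List String
  | 0 => [word]
  | n + 1 => letters.flatMap (fun l =>
      if pvOkB last l then pvExtend letters (word ++ l) (some l) n else [])

def generate_words_alt (gens : List String) (length : Int) : List String :=
  if length < 0 then []  -- Python B does not return normally here; excluded by Pre_
  else
    let letters := gens ++ gens.map PySem.Str.upper
    pvExtend letters "" none length.toNat

-- ===== PRECONDITION & SPEC =====
-- Pre_ excludes negative length, on which Python A raises ValueError (itertools.product with repeat < 0).
def Pre_generate_words (gens : List String) (length : Int) : Prop := 0 ≤ length
instance (gens : List String) (length : Int) : Decidable (Pre_generate_words gens length) := by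
  unfold Pre_generate_words; infer_instance
def pvWitness_generate_words : List String × Int := (["a", "b"], 2)

def Spec_generate_words (gens : List String) (length : Int) (out : List String) : Prop := out = generate_words_alt gens length
instance (gens : List String) (length : Int) (out : List String) : Decidable (Spec_generate_words gens length out) := by unfold Spec_generate_words; infer_instance

-- ===== CLAIM (what is proved, stated in full; the proofs are below) =====
def Claim_equal_generate_words : Prop := ∀ (gens : List String) (length : Int), Dom_generate_words gens length → Pre_generate_words gens length → Spec_generate_words gens length (generate_words gens length)

-- ===== LEMMAS AND PROOFS =====

-- the adjacency test as a chain predicate threading the previous letter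
def pvChain (last : Option String) : List String → Bool
  | [] => true
  | l :: c => pvOkB last l && pvChain (some l) c

lemma pvChain_none_cons (y : String) (t : List String) :
    pvChain none (y :: t) = pvChain (some y) t := by
  simp [pvChain, pvOkB]

-- the Nat-indexed form of A's validity loop equals the chain predicate
lemma pvValid_nat_eq_chain : ∀ (c : List String),
    ((List.range (c.length - 1)).all (fun k =>
      !(PySem.Str.lower (c.getD k "") == PySem.Str.lower (c.getD (k + 1) "")
        && c.getD k "" != c.getD (k + 1) ""))) = pvChain none c := by
  intro c
  induction c with
  | nil => simp [pvChain]
  | cons x t ih =>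
    cases t with
    | nil => simp [pvChain, pvOkB]
    | cons y u =>
      rw [show (x :: y :: u).length - 1 = ((y :: u).length - 1) + 1 by simp,
          List.range_succ_eq_map]
      rw [pvChain_none_cons]
      simp only [List.all_cons, List.all_map, Function.comp_def, Nat.succ_eq_add_one,
        List.getD_cons_succ, List.getD_cons_zero]
      simp only [List.getD_cons_succ] at ih
      rw [ih, pvChain_none_cons]
      simp [pvChain, pvOkB]

-- the index-based validity loop of A equals the chain predicate
lemma pvValidA_eq_chain (c : List String) : pvValidA c = pvChain none c := by
  unfold pvValidA
  rw [PySem.List.pyRange_one]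
  have hl : (((c.length : Int) - 1 - 0).toNat) = c.length - 1 := by omega
  rw [hl, List.all_map]
  rw [← pvValid_nat_eq_chain c]
  refine List.all_congr rfl (fun k => ?_)
  have h1 : ((0 : Int) + (k : Nat)) = ((k : Nat) : Int) := by ring
  have h2 : ((k : Nat) : Int) + 1 = (((k + 1 : Nat)) : Int) := by push_cast; ring
  simp only [Function.comp_def, h1, PySem.List.pyGetD_natCast]
  rw [h2, PySem.List.pyGetD_natCast]

-- ''.join over cons
lemma pvJoin_nil : PySem.Str.join "" ([] : List String) = "" := by
  apply String.toList_inj.mp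
  simp [PySem.Str.toList_join, PySem.Chars.join_nil]

lemma pvJoin_cons (l : String) (c : List String) :
    PySem.Str.join "" (l :: c) = l ++ PySem.Str.join "" c := by
  apply String.toList_inj.mp
  cases c with
  | nil =>
    simp [PySem.Str.toList_join, PySem.Chars.join, List.intercalate]
  | cons q rest =>
    rw [PySem.Str.toList_join]
    simp only [List.map_cons]
    rw [PySem.Chars.join_cons_cons]
    simp [PySem.Str.toList_join]

-- B's DFS = filter-then-map over the full product
lemma pvExtend_eq (letters : List String) (n : Nat) :
    ∀ (last : Option String) (word : String),
      pvExtend letters word last n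
        = ((pvProd letters n).filter (pvChain last)).map (fun c => word ++ PySem.Str.join "" c) := by
  induction n with
  | zero =>
    intro last word
    simp [pvExtend, pvProd, pvChain, pvJoin_nil]
  | succ n ih =>
    intro last word
    show letters.flatMap (fun l => if pvOkB last l then pvExtend letters (word ++ l) (some l) n else [])
      = (((letters.flatMap (fun l => (pvProd letters n).map (fun c => l :: c)))).filter
          (pvChain last)).map (fun c => word ++ PySem.Str.join "" c)
    rw [List.filter_flatMap, List.map_flatMap]
    apply List.flatMap_congr
    intro l _
    rw [List.filter_map]
    by_cases h : pvOkB last l = true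
    · rw [if_pos h]
      have hp : (pvChain last ∘ fun c => l :: c) = pvChain (some l) := by
        funext c; simp [Function.comp, pvChain, h]
      rw [hp, List.map_map, ih (some l) (word ++ l)]
      apply List.map_congr_left
      intro c _
      simp [Function.comp, pvJoin_cons, String.append_assoc]
    · rw [if_neg h]
      have hp : ∀ c, (pvChain last ∘ fun c => l :: c) c = false := by
        intro c
        simp only [Bool.not_eq_true] at h
        simp [Function.comp, pvChain, h]
      rw [List.filter_congr (fun c _ => hp c)]
      simp

theorem generate_words_spec : Claim_equal_generate_words := by
  intro gens length hdom hpre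
  unfold Spec_generate_words generate_words generate_words_alt
  have hneg : ¬ (length < 0) := by unfold Pre_generate_words at hpre; omega
  rw [if_neg hneg, if_neg hneg]
  rw [PySem.List.foldl_append_if]
  rw [List.filter_congr (fun c _ => pvValidA_eq_chain c)]
  rw [pvExtend_eq]
  simp
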